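-- pv_equiv track=rewrite | github.com/ShotDownDiane/verl-agent-co | agent_system/environments/format_reward.py | check_tsp_route_feasibility
-- ===== SOURCE A (Python) =====
-- from typing import List, Dict, Any, Optional, Tuple
--
-- def check_tsp_route_feasibility(
--     route: List[int],
--     num_nodes: int,
--     start_node: int = 0,
-- ) -> bool:
--     """Check if a TSP route is feasible.
--
--     A feasible TSP route should:
--     - Visit all nodes exactly once (except possibly returning to start)
--     - Start from the start_node (usually 0)
--     - Contain valid node indices
--
--     Args:
--         route: List of node indices representing the route
--         num_nodes: Total number of nodes in the problem
--         start_node: Expected starting node (default: 0)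
--
--     Returns:
--         True if the route is feasible, False otherwise
--     """
--     if not route:
--         return False
--
--     # Check if all indices are valid
--     if any(idx < 0 or idx >= num_nodes for idx in route):
--         return False
--
--     # Extract unique nodes visited (excluding potential return to start)
--     # For TSP, we typically expect: [start, node1, node2, ..., nodeN, start]
--     # or just [start, node1, node2, ..., nodeN]
--     unique_nodes = set(route)
--
--     # If route ends at start, remove the last occurrence
--     if len(route) > 1 and route[-1] == start_node:
--         route_core = route[:-1]
--     else:
--         route_core = route
--
--     # Check if we visit all nodes exactly once
--     if len(set(route_core)) != len(route_core):
--         return False  # Duplicate visits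
--
--     # Check if we visit all required nodes
--     if len(set(route_core)) < num_nodes:
--         return False  # Not all nodes visited
--
--     return True
-- ===== SOURCE B (Python) =====
-- from typing import List
--
-- def check_tsp_route_feasibility(
--     route: List[int],
--     num_nodes: int,
--     start_node: int = 0,
-- ) -> bool:
--     if num_nodes <= 0 or not route:
--         return False
--     if len(route) < num_nodes:
--         return False  # too short to visit every node
--     # index of the first element NOT subject to the exactly-once check
--     # (the trailing return-to-start element, when present)
--     last = len(route) - 1 if len(route) > 1 and route[-1] == start_node else len(route)
--     visited = [False] * num_nodes
--     for i, idx in enumerate(route):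
--         if idx < 0 or idx >= num_nodes:
--             return False
--         if i < last:
--             if visited[idx]:
--                 return False
--             visited[idx] = True
--     return all(visited)
-- ===== Notes on version B (the rewrite author's own statement) =====
-- stated objective: alternative
-- what changed: Replaces A's three set() constructions and two set-length comparisons by an early len(route) < num_nodes rejection plus a single pass over the route maintaining a boolean visited array (bound check, duplicate rejection and marking fused into one loop), finishing with all(visited).
import Mathlib
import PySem

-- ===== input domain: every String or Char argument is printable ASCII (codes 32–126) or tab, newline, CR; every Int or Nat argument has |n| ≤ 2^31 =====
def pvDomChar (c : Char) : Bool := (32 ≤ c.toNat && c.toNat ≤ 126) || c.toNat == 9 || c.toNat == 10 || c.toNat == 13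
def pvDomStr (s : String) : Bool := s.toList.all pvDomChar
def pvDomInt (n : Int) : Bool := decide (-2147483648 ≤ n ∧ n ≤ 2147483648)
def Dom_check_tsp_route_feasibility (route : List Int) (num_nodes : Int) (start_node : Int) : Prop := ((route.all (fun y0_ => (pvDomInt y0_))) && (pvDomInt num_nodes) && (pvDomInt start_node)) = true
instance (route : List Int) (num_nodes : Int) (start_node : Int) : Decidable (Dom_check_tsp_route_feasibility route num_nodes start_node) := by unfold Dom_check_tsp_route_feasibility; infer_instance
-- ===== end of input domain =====

-- B replaces A's three set() constructions by one pass over the route that maintains a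
-- boolean visited array, rejecting out-of-range and repeated core nodes on the fly and
-- finally requiring every node to be visited (objective: alternative, same O(n) cost).


-- ===== PORT A =====
def check_tsp_route_feasibility (route : List Int) (num_nodes : Int) (start_node : Int) : Bool :=
  if route.isEmpty then false
  else if route.any (fun idx => idx < 0 || num_nodes ≤ idx) then false
  else
    -- unique_nodes = set(route)  (computed and never used, as in the Python)
    let _unique_nodes := PySem.Set.ofList route
    let route_core :=
      if decide (route.length > 1) && (PySem.List.pyGet? route (-1) == some start_node)
      then PySem.List.slice route none (some (-1))      -- route[:-1]
      else route
    if (PySem.Set.ofList route_core).length ≠ route_core.length then false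
    else if ((PySem.Set.ofList route_core).length : Int) < num_nodes then false
    else true

-- ===== PORT B =====
-- the for-loop of Source B: early 'return False' = none; some v = loop fell through with array v
def tspVisit (num_nodes : Int) : List Bool → List Int → Nat → Nat → Option (List Bool)
  | visited, [], _, _ => some visited
  | visited, idx :: rest, i, last =>
    if idx < 0 || num_nodes ≤ idx then none
    else if i < last then
      if visited.getD idx.toNat false then none
      else tspVisit num_nodes (visited.set idx.toNat true) rest (i + 1) last
    else tspVisit num_nodes visited rest (i + 1) last

def check_tsp_route_feasibility_alt (route : List Int) (num_nodes : Int) (start_node : Int) : Bool :=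
  if num_nodes ≤ 0 || route.isEmpty then false
  else if (route.length : Int) < num_nodes then false
  else
    let last := if decide (route.length > 1) && (PySem.List.pyGet? route (-1) == some start_node)
      then route.length - 1 else route.length
    match tspVisit num_nodes (List.replicate num_nodes.toNat false) route 0 last with
    | none => false
    | some visited => visited.all id

-- ===== PRECONDITION & SPEC =====
def Spec_check_tsp_route_feasibility (route : List Int) (num_nodes : Int) (start_node : Int) (out : Bool) : Prop := out = check_tsp_route_feasibility_alt route num_nodes start_node
instance (route : List Int) (num_nodes : Int) (start_node : Int) (out : Bool) : Decidable (Spec_check_tsp_route_feasibility route num_nodes start_node out) := by unfold Spec_check_tsp_route_feasibility; infer_instance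

-- ===== CLAIM (what is proved, stated in full; the proofs are below) =====
def Claim_equal_check_tsp_route_feasibility : Prop := ∀ (route : List Int) (num_nodes : Int) (start_node : Int), Dom_check_tsp_route_feasibility route num_nodes start_node → Spec_check_tsp_route_feasibility route num_nodes start_node (check_tsp_route_feasibility route num_nodes start_node)

-- ===== LEMMAS AND PROOFS =====

theorem discard_sublist (s : List Int) (x : Int) : (PySem.Set.discard s x).Sublist s := by
  unfold PySem.Set.discard; exact List.filter_sublist

theorem ofList_sublist (xs : List Int) : (PySem.Set.ofList xs).Sublist xs := by
  induction xs with
  | nil => simp [PySem.Set.ofList_nil]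
  | cons x xs ih =>
    rw [PySem.Set.ofList_cons]
    exact ((discard_sublist _ _).trans ih).cons₂ x

theorem nodup_of_ofList_length_eq (xs : List Int)
    (h : (PySem.Set.ofList xs).length = xs.length) : xs.Nodup := by
  have := (ofList_sublist xs).eq_of_length h
  rw [← this]; exact PySem.Set.nodup_ofList xs

theorem getD_replicate_false (m j : Nat) : (List.replicate m false).getD j false = false := by
  unfold List.getD
  rw [List.getElem?_replicate]
  split <;> rfl

theorem getD_set_bool (l : List Bool) (k j : Nat) (b : Bool) (hk : k < l.length) :
    (l.set k b).getD j false = if j = k then b else l.getD j false := by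
  by_cases h : j = k
  · subst h
    simp [List.getD, hk]
  · simp [List.getD, List.getElem?_set_ne (by omega : k ≠ j), h]

-- B's loop invariant: 'the loop has not returned False so far' ≡ bounds hold, the core part
-- seen is duplicate-free, and it avoids the already-marked cells
def tspGood (n : Int) (visited : List Bool) (rest : List Int) (k : Nat) : Prop :=
  (∀ x ∈ rest, 0 ≤ x ∧ x < n) ∧ (rest.take k).Nodup ∧
    ∀ x ∈ rest.take k, visited.getD x.toNat false = false

theorem tspGood_cons_succ (n : Int) (visited : List Bool) (x : Int) (rest : List Int) (k : Nat)
    (hx : 0 ≤ x ∧ x < n) (hdup : visited.getD x.toNat false = false)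
    (hxl : x.toNat < visited.length) :
    tspGood n visited (x :: rest) (k + 1) ↔ tspGood n (visited.set x.toNat true) rest k := by
  unfold tspGood
  rw [List.take_succ_cons]
  constructor
  · rintro ⟨hb, hnd, hfresh⟩
    have hnd' := List.nodup_cons.mp hnd
    refine ⟨fun y hy => hb y (List.mem_cons_of_mem x hy), hnd'.2, fun y hy => ?_⟩
    rw [getD_set_bool _ _ _ _ hxl]
    have hyb := hb y (List.mem_cons_of_mem x (List.mem_of_mem_take hy))
    have hne : y ≠ x := fun he => hnd'.1 (he ▸ hy)
    rw [if_neg (by omega)]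
    exact hfresh y (List.mem_cons_of_mem x hy)
  · rintro ⟨hb, hnd, hfresh⟩
    refine ⟨?_, List.nodup_cons.mpr ⟨?_, hnd⟩, ?_⟩
    · intro y hy
      rcases List.mem_cons.mp hy with rfl | hy'
      · exact hx
      · exact hb y hy'
    · intro hmem
      have := hfresh x hmem
      rw [getD_set_bool _ _ _ _ hxl, if_pos rfl] at this
      exact absurd this (by simp)
    · intro y hy
      rcases List.mem_cons.mp hy with rfl | hy'
      · exact hdup
      · have h' := hfresh y hy'
        rw [getD_set_bool _ _ _ _ hxl] at h'
        by_cases he : y.toNat = x.toNat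
        · rw [if_pos he] at h'; exact absurd h' (by simp)
        · rwa [if_neg he] at h'

theorem tspVisit_spec (n : Int) :
    ∀ (rest : List Int) (visited : List Bool) (i last : Nat),
    visited.length = n.toNat →
    (match tspVisit n visited rest i last with
     | none => ¬ tspGood n visited rest (last - i)
     | some w => tspGood n visited rest (last - i) ∧ w.length = n.toNat ∧
         ∀ j : Nat, w.getD j false =
           (visited.getD j false || decide ((j : Int) ∈ rest.take (last - i)))) := by
  intro rest
  induction rest with
  | nil =>
    intro visited i last hlen
    simp [tspVisit, tspGood, hlen]
  | cons x rest ih =>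
    intro visited i last hlen
    by_cases hb : (x < 0 || n ≤ x) = true
    · rw [show tspVisit n visited (x :: rest) i last = none by
        unfold tspVisit; rw [if_pos hb]]
      rintro ⟨hbound, -, -⟩
      have := hbound x (List.mem_cons_self)
      simp only [Bool.or_eq_true, decide_eq_true_eq] at hb
      omega
    · have hx : 0 ≤ x ∧ x < n := by
        simp only [Bool.or_eq_true, decide_eq_true_eq] at hb; push Not at hb; omega
      have hxl : x.toNat < visited.length := by rw [hlen]; omega
      by_cases hi : i < last
      · have hk : last - i = (last - (i + 1)) + 1 := by omega
        by_cases hdup : visited.getD x.toNat false = true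
        · rw [show tspVisit n visited (x :: rest) i last = none by
            rw [tspVisit, if_neg hb, if_pos hi, if_pos hdup]]
          rintro ⟨-, -, hfresh⟩
          have := hfresh x (by rw [hk, List.take_succ_cons]; exact List.mem_cons_self)
          rw [hdup] at this; exact absurd this (by simp)
        · rw [show tspVisit n visited (x :: rest) i last
              = tspVisit n (visited.set x.toNat true) rest (i + 1) last by
            rw [tspVisit, if_neg hb, if_pos hi, if_neg hdup]]
          have hdup' : visited.getD x.toNat false = false := by
            revert hdup; cases visited.getD x.toNat false <;> simp
          have hlen' : (visited.set x.toNat true).length = n.toNat := by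
            rw [List.length_set]; exact hlen
          have hiff := tspGood_cons_succ n visited x rest (last - (i + 1)) hx hdup' hxl
          have himem : ∀ j : Nat, (visited.getD j false ||
                decide ((j : Int) ∈ (x :: rest).take (last - i)))
              = ((visited.set x.toNat true).getD j false ||
                decide ((j : Int) ∈ rest.take (last - (i + 1)))) := by
            intro j
            rw [hk, List.take_succ_cons, getD_set_bool _ _ _ _ hxl]
            by_cases he : j = x.toNat
            · rw [if_pos he]
              have hjx : (j : Int) = x := by omega
              have hmem : (j : Int) ∈ x :: List.take (last - (i + 1)) rest :=
                hjx ▸ List.mem_cons_self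
              simp [hmem]
            · rw [if_neg he]
              have hjx : (j : Int) ≠ x := by omega
              simp [List.mem_cons, hjx]
          have := ih (visited.set x.toNat true) (i + 1) last hlen'
          revert this
          cases htv : tspVisit n (visited.set x.toNat true) rest (i + 1) last with
          | none =>
            intro hres hgood
            exact hres ((hk ▸ hiff).mp hgood)
          | some w =>
            rintro ⟨hgood, hwlen, hchar⟩
            refine ⟨(hk ▸ hiff).mpr hgood, hwlen, fun j => ?_⟩
            rw [hchar j, himem j]
      · have hk0 : last - i = 0 := by omega
        have hk0' : last - (i + 1) = 0 := by omega
        rw [show tspVisit n visited (x :: rest) i last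
            = tspVisit n visited rest (i + 1) last by
          rw [tspVisit, if_neg hb, if_neg hi]]
        have := ih visited (i + 1) last hlen
        revert this
        cases htv : tspVisit n visited rest (i + 1) last with
        | none =>
          intro hres hgood
          refine hres ?_
          rw [hk0'] at *
          obtain ⟨hbnd, h2, h3⟩ := hgood
          exact ⟨fun y hy => hbnd y (List.mem_cons_of_mem x hy), by simpa using h2,
            by simpa using h3⟩
        | some w =>
          rintro ⟨⟨hbnd, -, -⟩, hwlen, hchar⟩
          rw [hk0, hk0'] at *
          refine ⟨⟨fun y hy => ?_, by simp, by simp⟩, hwlen, fun j => by simpa using hchar j⟩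
          rcases List.mem_cons.mp hy with rfl | hy'
          · exact hx
          · exact hbnd y hy'

theorem all_id_iff_getD (w : List Bool) :
    w.all id = true ↔ ∀ j < w.length, w.getD j false = true := by
  rw [List.all_eq_true]
  constructor
  · intro h j hj
    rw [List.getD_eq_getElem w false hj]
    exact h _ (List.getElem_mem hj)
  · intro h b hb
    obtain ⟨j, hj, rfl⟩ := List.mem_iff_getElem.mp hb
    have := h j hj
    rwa [List.getD_eq_getElem w false hj] at this

-- exactly-once check: a duplicate-free in-range list covers all of [0, n) iff it has ≥ n elements
theorem nodup_cover_iff (core : List Int) (n : Int) (hn : 0 < n)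
    (hb : ∀ x ∈ core, 0 ≤ x ∧ x < n) (hnd : core.Nodup) :
    (n ≤ (core.length : Int)) ↔ ∀ j < n.toNat, (j : Int) ∈ core := by
  set R : List Int := List.map (fun j : Nat => (j : Int)) (List.range n.toNat) with hR
  have hRnd : R.Nodup := List.nodup_range.map (fun a b h => by omega)
  have hRlen : R.length = n.toNat := by simp [hR]
  have hmemR : ∀ y : Int, y ∈ R ↔ 0 ≤ y ∧ y < n := by
    intro y
    rw [hR, List.mem_map]
    constructor
    · rintro ⟨j, hj, rfl⟩
      rw [List.mem_range] at hj
      omega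
    · intro hy
      exact ⟨y.toNat, List.mem_range.mpr (by omega), by omega⟩
  constructor
  · intro hlen j hj
    have hsub : core ⊆ R := fun x hx => (hmemR x).mpr (hb x hx)
    have hsp := List.subperm_of_subset hnd hsub
    have hperm : core.Perm R := hsp.perm_of_length_le (by omega)
    exact hperm.mem_iff.mpr ((hmemR _).mpr (by omega))
  · intro hcov
    have hsub : R ⊆ core := by
      intro y hy
      have := (hmemR y).mp hy
      have : y = ((y.toNat : Nat) : Int) := by omega
      rw [this]
      exact hcov y.toNat (by omega)
    have := (List.subperm_of_subset hRnd hsub).length_le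
    omega

-- ===== VERDICT (by name: the statement is the Claim_ definition above) =====
theorem check_tsp_route_feasibility_spec : Claim_equal_check_tsp_route_feasibility := by
  intro route n s _dom
  unfold Spec_check_tsp_route_feasibility
  unfold check_tsp_route_feasibility check_tsp_route_feasibility_alt
  by_cases he : route.isEmpty
  · simp [he]
  · by_cases hg : route.any (fun idx => idx < 0 || n ≤ idx)
    · -- some index out of range: A returns false; B's loop hits it and returns false too
      simp only [he, Bool.false_eq_true, if_false, hg, if_true]
      have hbad : ∃ x ∈ route, ¬(0 ≤ x ∧ x < n) := by
        obtain ⟨x, hx, hxb⟩ := List.any_eq_true.mp hg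
        exact ⟨x, hx, by simp only [Bool.or_eq_true, decide_eq_true_eq] at hxb; omega⟩
      by_cases hn0 : n ≤ 0
      · have h0 : (decide (n ≤ 0) || false) = true := by simp [hn0]
        rw [if_pos h0]
      · have h0 : ¬ ((decide (n ≤ 0) || false) = true) := by simp [hn0]
        rw [if_neg h0]
        by_cases hsmall : ((route.length : Int) < n)
        · rw [if_pos hsmall]
        · rw [if_neg hsmall]
          set lastN := (if decide (route.length > 1) && (PySem.List.pyGet? route (-1) == some s)
            then route.length - 1 else route.length) with hlastN
          have hs := tspVisit_spec n route (List.replicate n.toNat false) 0 lastN (by simp)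
          cases htv : tspVisit n (List.replicate n.toNat false) route 0 lastN with
          | none => rfl
          | some w =>
            rw [htv] at hs
            obtain ⟨⟨hbnd, -, -⟩, -, -⟩ := hs
            obtain ⟨x, hx, hxb⟩ := hbad
            exact absurd (hbnd x hx) hxb
    · -- all indices in range
      simp only [he, Bool.false_eq_true, if_false, hg, if_false]
      have hall : ∀ x ∈ route, 0 ≤ x ∧ x < n := by
        intro x hx
        have := (List.any_eq_false).mp (Bool.eq_false_iff.mpr hg) x hx
        simp only [Bool.or_eq_true, decide_eq_true_eq] at this
        omega
      have hrne : route ≠ [] := by simpa using he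
      have hn : 0 < n := by
        cases route with
        | nil => exact absurd rfl hrne
        | cons y ys => have := hall y (by simp); omega
      have hnle : ¬ n ≤ 0 := by omega
      have h0 : ¬ ((decide (n ≤ 0) || false) = true) := by simp [hnle]
      rw [if_neg h0]
      -- both sides work on core = route.take last
      set lastN := (if decide (route.length > 1) && (PySem.List.pyGet? route (-1) == some s)
        then route.length - 1 else route.length) with hlastN
      have hcoreA :
          (if decide (route.length > 1) && (PySem.List.pyGet? route (-1) == some s)
           then PySem.List.slice route none (some (-1)) else route) = route.take lastN := by
        rw [hlastN]
        split
        · rw [PySem.List.slice_to_neg_one, List.dropLast_eq_take]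
        · rw [List.take_length]
      rw [hcoreA]
      set core := route.take lastN with hcore
      have hbc : ∀ x ∈ core, 0 ≤ x ∧ x < n := fun x hx => hall x (List.mem_of_mem_take hx)
      have hclen : core.length ≤ route.length := by rw [hcore]; simp
      by_cases hsmall : ((route.length : Int) < n)
      · -- route shorter than num_nodes: B's new guard and A's second set test both say False
        rw [if_pos hsmall]
        by_cases h1 : (PySem.Set.ofList core).length ≠ core.length
        · rw [if_pos h1]
        · rw [if_neg h1]
          push Not at h1
          rw [if_pos (by omega : ((PySem.Set.ofList core).length : Int) < n)]
      · rw [if_neg hsmall]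
        have hs := tspVisit_spec n route (List.replicate n.toNat false) 0 lastN (by simp)
        cases htv : tspVisit n (List.replicate n.toNat false) route 0 lastN with
        | none =>
          -- B's loop returned False: core has a duplicate, so A's first set test fires
          rw [htv] at hs
          rw [if_pos]
          intro hlen
          exact hs ⟨hall, nodup_of_ofList_length_eq core (by simpa using hlen),
            fun x _ => getD_replicate_false _ _⟩
        | some w =>
          rw [htv] at hs
          obtain ⟨⟨-, hnd, -⟩, hwlen, hchar⟩ := hs
          simp only [Nat.sub_zero, ← hcore] at hnd hchar
          have hofl : PySem.Set.ofList core = core := PySem.Set.ofList_eq_self_of_nodup core hnd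
          rw [hofl, if_neg (by simp)]
          have hcov := nodup_cover_iff core n hn hbc hnd
          have hwall : w.all id = true ↔ ∀ j < n.toNat, (j : Int) ∈ core := by
            rw [all_id_iff_getD, hwlen]
            constructor
            · intro h j hj
              have := h j hj
              rw [hchar j, getD_replicate_false, Bool.false_or, decide_eq_true_eq] at this
              exact this
            · intro h j hj
              rw [hchar j, getD_replicate_false, Bool.false_or, decide_eq_true_eq]
              exact h j hj
          by_cases hlt : ((core.length : Int) < n)
          · rw [if_pos hlt]
            symm
            rw [Bool.eq_false_iff]
            intro hT
            have := hcov.mpr (hwall.mp hT)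
            omega
          · rw [if_neg hlt]
            symm
            exact hwall.mpr (hcov.mp (by omega))
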